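-- pv_equiv track=rewrite | github.com/SiddarthAA/TraceX | src/analyze/unified_analyzer.py | _trace_backward
-- ===== SOURCE A (Python) =====
-- from typing import Dict, Any, List, Tuple
--
-- def _trace_backward(
--     start_id: str,
--     graph: Dict[str, Any],
--     artifacts: Dict[str, Any],
--     visited: set = None
-- ) -> List[List[str]]:
--     """Trace backward from a node to find all upstream paths."""
--
--     if visited is None:
--         visited = set()
--
--     if start_id in visited:
--         return []
--
--     visited.add(start_id)
--     parents = graph['edges_up'].get(start_id, [])
--
--     if not parents:
--         return [[start_id]]
--
--     all_paths = []
--     for parent in parents: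
--         parent_paths = _trace_backward(parent, graph, artifacts, visited.copy())
--         for path in parent_paths:
--             all_paths.append(path + [start_id])
--
--     return all_paths
-- ===== SOURCE B (Python) =====
-- from typing import Dict, Any, List, Tuple
--
-- def _trace_backward(
--     start_id: str,
--     graph: Dict[str, Any],
--     artifacts: Dict[str, Any],
--     visited: set = None
-- ) -> List[List[str]]:
--     """Trace backward from a node: iterative DFS with an explicit stack."""
--
--     if visited is None:
--         visited = set()
--
--     if start_id in visited:
--         return []
--
--     visited.add(start_id)
--     edges_up = graph['edges_up']
--
--     results = []
--     stack = [(start_id, [start_id])]  # (node, path from start_id up to node)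
--     while stack:
--         node, path = stack.pop()
--         parents = edges_up.get(node, [])
--         if not parents:
--             results.append(path[::-1])
--         else:
--             for parent in reversed(parents):
--                 if parent not in visited and parent not in path:
--                     stack.append((parent, path + [parent]))
--     return results
-- ===== Notes on version B (the rewrite author's own statement) =====
-- stated objective: alternative
-- what changed: Replaces A's recursion (which copies the visited set at every node and rebuilds every path at every level via path+[start_id]) with an iterative DFS over an explicit stack of (node, path) pairs, checking cycles against the current path and emitting each finished path once, reversed.
import Mathlib
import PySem

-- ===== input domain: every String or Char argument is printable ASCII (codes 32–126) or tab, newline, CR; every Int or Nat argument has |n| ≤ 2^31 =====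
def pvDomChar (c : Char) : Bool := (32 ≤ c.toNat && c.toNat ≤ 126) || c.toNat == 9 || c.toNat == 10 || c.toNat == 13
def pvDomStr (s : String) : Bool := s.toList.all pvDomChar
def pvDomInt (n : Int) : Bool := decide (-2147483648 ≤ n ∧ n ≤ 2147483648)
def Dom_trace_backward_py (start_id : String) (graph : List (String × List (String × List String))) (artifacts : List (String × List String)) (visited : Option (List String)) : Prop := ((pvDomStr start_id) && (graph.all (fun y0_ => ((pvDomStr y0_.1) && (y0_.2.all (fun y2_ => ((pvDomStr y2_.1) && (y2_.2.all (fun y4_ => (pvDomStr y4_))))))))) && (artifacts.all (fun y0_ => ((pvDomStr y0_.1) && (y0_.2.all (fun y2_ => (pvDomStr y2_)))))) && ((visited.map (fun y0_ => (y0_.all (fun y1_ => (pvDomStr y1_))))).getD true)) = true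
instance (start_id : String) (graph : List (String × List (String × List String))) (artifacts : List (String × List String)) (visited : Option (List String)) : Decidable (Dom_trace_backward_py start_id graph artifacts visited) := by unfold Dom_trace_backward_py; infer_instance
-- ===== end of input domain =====

-- B replaces A's recursion (which copies the visited set at every node and re-appends
-- start_id to every path at every level) by an iterative DFS with an explicit stack of
-- (node, path) pairs, emitting each finished path once, reversed (objective: alternative).
-- A mutates its `visited` argument (adds start_id); B performs the same mutation in Python;
-- the equivalence proved here is about the return value only.

-- ===== PORT A =====
-- fuel bound for A's recursion: total number of parent occurrences in edges_up, + 2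
def pvFuelA (graph : List (String × List (String × List String))) : Nat :=
  (match (PySem.Dict.mk graph).get? "edges_up" with
   | none => 0
   | some E => (E.map (fun kv => kv.2.length)).sum) + 2

def pvRecA (graph : List (String × List (String × List String))) :
    Nat → String → List String → List (List String)
  | 0, _, _ => []
  | f+1, node, vis =>
    if node ∈ vis then []
    else
      let vis' := PySem.Set.add vis node
      match (PySem.Dict.mk graph).get? "edges_up" with
      | none => []   -- Python raises KeyError (graph['edges_up']); excluded by Pre_
      | some E =>
        let parents := ((PySem.Dict.mk E).get? node).getD []
        if parents.isEmpty then [[node]]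
        else
          parents.foldl
            (fun all_paths p =>
              all_paths ++ (pvRecA graph f p vis').map (fun path => path ++ [node])) []

def trace_backward_py (start_id : String) (graph : List (String × List (String × List String))) (artifacts : List (String × List String)) (visited : Option (List String)) : List (List String) :=
  pvRecA graph (pvFuelA graph) start_id (visited.getD [])

-- ===== PORT B =====
-- fuel bound for B's loop: (P+2)^(P+2) iterations, P = total number of parent occurrences
def pvFuelB (graph : List (String × List (String × List String))) : Nat :=
  match (PySem.Dict.mk graph).get? "edges_up" with
  | none => 1
  | some E => ((E.map (fun kv => kv.2.length)).sum + 2) ^ ((E.map (fun kv => kv.2.length)).sum + 2)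

def pvLoopB (E : List (String × List String)) (vis : List String) :
    Nat → List (String × List String) → List (List String) → List (List String)
  | 0, _, results => results
  | f+1, stack, results =>
    match stack with
    | [] => results
    | (node, path) :: rest =>
      let parents := ((PySem.Dict.mk E).get? node).getD []
      if parents.isEmpty then
        pvLoopB E vis f rest (results ++ [path.reverse])
      else
        pvLoopB E vis f
          (parents.reverse.foldl
            (fun st p => if p ∉ vis ∧ p ∉ path then (p, path ++ [p]) :: st else st) rest)
          results

def trace_backward_py_alt (start_id : String) (graph : List (String × List (String × List String))) (artifacts : List (String × List String)) (visited : Option (List String)) : List (List String) :=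
  let vis := visited.getD []
  if start_id ∈ vis then []
  else
    match (PySem.Dict.mk graph).get? "edges_up" with
    | none => []   -- Python raises KeyError (graph['edges_up']); excluded by Pre_
    | some E => pvLoopB E (PySem.Set.add vis start_id) (pvFuelB graph) [(start_id, [start_id])] []

-- ===== PRECONDITION & SPEC =====
-- Pre_ excludes exactly the inputs where Python raises KeyError on graph['edges_up']:
-- the key 'edges_up' is missing and the early return (start_id already in visited) is not taken.
def Pre_trace_backward_py (start_id : String) (graph : List (String × List (String × List String))) (artifacts : List (String × List String)) (visited : Option (List String)) : Prop :=
  start_id ∈ (visited.getD []) ∨ "edges_up" ∈ graph.map Prod.fst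
instance (start_id : String) (graph : List (String × List (String × List String))) (artifacts : List (String × List String)) (visited : Option (List String)) : Decidable (Pre_trace_backward_py start_id graph artifacts visited) := by unfold Pre_trace_backward_py; infer_instance

def pvWitness_trace_backward_py : String × (List (String × List (String × List String))) × (List (String × List String)) × Option (List String) :=
  ("a", [("edges_up", [("a", ["b"]), ("b", [])])], [], none)

def Spec_trace_backward_py (start_id : String) (graph : List (String × List (String × List String))) (artifacts : List (String × List String)) (visited : Option (List String)) (out : List (List String)) : Prop := out = trace_backward_py_alt start_id graph artifacts visited
instance (start_id : String) (graph : List (String × List (String × List String))) (artifacts : List (String × List String)) (visited : Option (List String)) (out : List (List String)) : Decidable (Spec_trace_backward_py start_id graph artifacts visited out) := by unfold Spec_trace_backward_py; infer_instance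

-- ===== CLAIM (what is proved, stated in full; the proofs are below) =====
def Claim_equal_trace_backward_py : Prop := ∀ (start_id : String) (graph : List (String × List (String × List String))) (artifacts : List (String × List String)) (visited : Option (List String)), Dom_trace_backward_py start_id graph artifacts visited → Pre_trace_backward_py start_id graph artifacts visited → Spec_trace_backward_py start_id graph artifacts visited (trace_backward_py start_id graph artifacts visited)

-- ===== LEMMAS AND PROOFS =====

-- E-specialised clone of A's recursion (proof-side only)
def pvRecAE (E : List (String × List String)) : Nat → String → List String → List (List String)
  | 0, _, _ => []
  | f+1, node, vis =>
    if node ∈ vis then []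
    else
      if (((PySem.Dict.mk E).get? node).getD []).isEmpty then [[node]]
      else
        (((PySem.Dict.mk E).get? node).getD []).foldl
          (fun all_paths p =>
            all_paths ++ (pvRecAE E f p (PySem.Set.add vis node)).map (fun path => path ++ [node])) []

lemma pvRecA_succ (graph : List (String × List (String × List String))) (f : Nat) (n : String) (vis : List String) :
    pvRecA graph (f+1) n vis =
      if n ∈ vis then []
      else
        match (PySem.Dict.mk graph).get? "edges_up" with
        | none => []
        | some E =>
          if (((PySem.Dict.mk E).get? n).getD []).isEmpty then [[n]]
          else
            (((PySem.Dict.mk E).get? n).getD []).foldl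
              (fun all_paths p =>
                all_paths ++ (pvRecA graph f p (PySem.Set.add vis n)).map (fun path => path ++ [n])) [] := rfl

lemma pvRecAE_succ (E : List (String × List String)) (f : Nat) (n : String) (vis : List String) :
    pvRecAE E (f+1) n vis =
      if n ∈ vis then []
      else
        if (((PySem.Dict.mk E).get? n).getD []).isEmpty then [[n]]
        else
          (((PySem.Dict.mk E).get? n).getD []).foldl
            (fun all_paths p =>
              all_paths ++ (pvRecAE E f p (PySem.Set.add vis n)).map (fun path => path ++ [n])) [] := rfl

lemma pvLoopB_succ (E : List (String × List String)) (vis : List String) (f : Nat)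
    (node : String) (path : List String) (rest : List (String × List String)) (res : List (List String)) :
    pvLoopB E vis (f+1) ((node, path) :: rest) res =
      if (((PySem.Dict.mk E).get? node).getD []).isEmpty then
        pvLoopB E vis f rest (res ++ [path.reverse])
      else
        pvLoopB E vis f
          ((((PySem.Dict.mk E).get? node).getD []).reverse.foldl
            (fun st p => if p ∉ vis ∧ p ∉ path then (p, path ++ [p]) :: st else st) rest)
          res := rfl

lemma pvRecA_eq (graph : List (String × List (String × List String))) (E : List (String × List String))
    (h : (PySem.Dict.mk graph).get? "edges_up" = some E) :
    ∀ f n vis, pvRecA graph f n vis = pvRecAE E f n vis := by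
  intro f
  induction f with
  | zero => intro n vis; rfl
  | succ f ih =>
    intro n vis
    rw [pvRecA_succ, pvRecAE_succ]
    simp only [h]
    by_cases hm : n ∈ vis
    · simp [hm]
    · simp only [hm, if_false]
      by_cases he : (((PySem.Dict.mk E).get? n).getD []).isEmpty
      · rw [if_pos he, if_pos he]
      · rw [if_neg he, if_neg he]
        apply PySem.List.foldl_congr_mem
        intro acc p _
        rw [ih]

lemma pvRecAE_nil_of_mem (E : List (String × List String)) (f : Nat) (n : String) (vis : List String)
    (h : n ∈ vis) : pvRecAE E f n vis = [] := by
  cases f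
  · rfl
  · rw [pvRecAE_succ, if_pos h]

lemma pvLoopB_nil (E : List (String × List String)) (vis : List String) (f : Nat) (res : List (List String)) :
    pvLoopB E vis f [] res = res := by
  cases f <;> rfl

lemma pvAdd_eq (l : List String) (x : String) (hx : x ∉ l) : PySem.Set.add l x = l ++ [x] := by
  simp [PySem.Set.add, PySem.Set.contains, hx]

-- first-match lookup yields one of the stored parent lists
lemma pvGet_sub (E : List (String × List String)) (n : String) :
    ∀ p ∈ ((PySem.Dict.mk E).get? n).getD [], p ∈ E.flatMap (fun kv => kv.2) := by
  induction E with
  | nil => intro p hp; simp [PySem.Dict.get?] at hp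
  | cons kv E ih =>
    obtain ⟨k, v⟩ := kv
    intro p hp
    rw [PySem.Dict.get?_mk_cons] at hp
    by_cases h : (k == n) = true
    · rw [if_pos h] at hp
      simp only [Option.getD_some] at hp
      simp only [List.flatMap_cons, List.mem_append]
      exact Or.inl hp
    · rw [if_neg h] at hp
      simp only [List.flatMap_cons, List.mem_append]
      exact Or.inr (ih p hp)

lemma pvGet_len (E : List (String × List String)) (n : String) :
    (((PySem.Dict.mk E).get? n).getD []).length ≤ (E.map (fun kv => kv.2.length)).sum := by
  induction E with
  | nil => simp [PySem.Dict.get?]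
  | cons kv E ih =>
    obtain ⟨k, v⟩ := kv
    rw [PySem.Dict.get?_mk_cons]
    by_cases h : (k == n) = true
    · rw [if_pos h]; simp
    · rw [if_neg h]
      simp only [List.map_cons, List.sum_cons]
      exact le_trans ih (Nat.le_add_left _ _)

lemma pvKey_some (graph : List (String × List (String × List String)))
    (h : "edges_up" ∈ graph.map Prod.fst) :
    ∃ E, (PySem.Dict.mk graph).get? "edges_up" = some E := by
  induction graph with
  | nil => simp at h
  | cons kv g ih =>
    obtain ⟨k, v⟩ := kv
    rw [PySem.Dict.get?_mk_cons]
    by_cases hk : (k == "edges_up") = true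
    · exact ⟨v, by rw [if_pos hk]⟩
    · rw [if_neg hk]
      apply ih
      simp only [List.map_cons, List.mem_cons] at h
      rcases h with h | h
      · exact absurd (by simp [h.symm]) hk
      · exact h

-- reversed-push loop = filtered items prepended (leftmost parent ends on top of the stack)
lemma pvPush_eq (vis path : List String) :
    ∀ (ps : List String) (rest : List (String × List String)),
      ps.reverse.foldl (fun st p => if p ∉ vis ∧ p ∉ path then (p, path ++ [p]) :: st else st) rest
      = (ps.filterMap (fun p => if p ∉ vis ∧ p ∉ path then some (p, path ++ [p]) else none)) ++ rest := by
  intro ps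
  induction ps with
  | nil => intro rest; rfl
  | cons p ps ih =>
    intro rest
    simp only [List.reverse_cons, List.foldl_append, List.foldl_cons, List.foldl_nil,
      List.filterMap_cons, ih]
    by_cases h : p ∉ vis ∧ p ∉ path
    · simp [h]
    · simp [h]

-- the main correspondence: processing one stack item performs exactly A's recursion below it
lemma pvMain (E : List (String × List String)) (vis0 : List String) (start : String)
    (hs : start ∉ vis0) :
    ∀ (f : Nat) (n : String) (pre : List String),
      start ∈ pre ++ [n] →
      (pre ++ [n]).Nodup →
      n ∉ vis0 →
      (pre ++ [n]).tail ⊆ E.flatMap (fun kv => kv.2) →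
      (E.map (fun kv => kv.2.length)).sum + 1 ≤ (f + 1) + pre.length →
      ∃ k, k ≤ ((E.map (fun kv => kv.2.length)).sum + 2) ^ (f + 1) ∧
        ∀ (f' : Nat) (rest : List (String × List String)) (res : List (List String)),
          pvLoopB E (PySem.Set.add vis0 start) (k + f') ((n, pre ++ [n]) :: rest) res
          = pvLoopB E (PySem.Set.add vis0 start) f' rest
              (res ++ (pvRecAE E (f + 1) n (vis0 ++ pre)).map (fun q => q ++ pre.reverse)) := by
  intro f
  induction f with
  | zero =>
    intro n pre h1 h2 h3 h4 h5
    have h2' := h2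
    rw [List.nodup_append] at h2'
    have hnpre : n ∉ pre := fun hm => h2'.2.2 n hm n (by simp) rfl
    have hnvis : n ∉ vis0 ++ pre := by simp [List.mem_append, h3, hnpre]
    by_cases hemp : (((PySem.Dict.mk E).get? n).getD []).isEmpty
    · refine ⟨1, Nat.one_le_pow _ _ (by omega), ?_⟩
      intro f' rest res
      rw [show 1 + f' = f' + 1 from Nat.add_comm 1 f']
      rw [pvLoopB_succ, if_pos hemp, pvRecAE_succ, if_neg hnvis, if_pos hemp]
      congr 1
      simp [List.reverse_append]
    · have hnovalid : ∀ p ∈ ((PySem.Dict.mk E).get? n).getD [],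
          ¬(p ∉ PySem.Set.add vis0 start ∧ p ∉ pre ++ [n]) := by
        intro p hp hc
        have hnd : ((pre ++ [n]) ++ [p]).Nodup := by
          rw [List.nodup_append]
          refine ⟨h2, by simp, ?_⟩
          intro a ha b hb
          simp only [List.mem_singleton] at hb
          subst hb
          exact fun heq => hc.2 (heq ▸ ha)
        have hsub' : ((pre ++ [n]) ++ [p]).tail ⊆ E.flatMap (fun kv => kv.2) := by
          intro q hq
          rw [List.tail_append_singleton_of_ne_nil (by simp)] at hq
          rcases List.mem_append.mp hq with hql | hqr
          · exact h4 hql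
          · simp only [List.mem_singleton] at hqr
            rw [hqr]; exact pvGet_sub E n p hp
        have hlen := (((List.tail_sublist _).nodup hnd).subperm hsub').length_le
        rw [List.tail_append_singleton_of_ne_nil (by simp)] at hlen
        simp only [List.length_append, List.length_tail, List.length_singleton,
          List.length_flatMap] at hlen
        omega
      refine ⟨1, Nat.one_le_pow _ _ (by omega), ?_⟩
      intro f' rest res
      rw [show 1 + f' = f' + 1 from Nat.add_comm 1 f']
      rw [pvLoopB_succ, if_neg hemp, pvPush_eq]
      have hfm : (((PySem.Dict.mk E).get? n).getD []).filterMap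
          (fun p => if p ∉ PySem.Set.add vis0 start ∧ p ∉ pre ++ [n]
                    then some (p, (pre ++ [n]) ++ [p]) else none) = [] := by
        rw [List.filterMap_eq_nil_iff]
        intro p hp
        rw [if_neg (hnovalid p hp)]
      rw [hfm]
      have hrec : pvRecAE E 1 n (vis0 ++ pre) = [] := by
        rw [pvRecAE_succ, if_neg hnvis, if_neg hemp]
        rw [PySem.List.foldl_append_eq_flatMap]
        simp [pvRecAE]
      rw [hrec]
      simp
  | succ f ih =>
    intro n pre h1 h2 h3 h4 h5
    have h2' := h2
    rw [List.nodup_append] at h2'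
    have hnpre : n ∉ pre := fun hm => h2'.2.2 n hm n (by simp) rfl
    have hnvis : n ∉ vis0 ++ pre := by simp [List.mem_append, h3, hnpre]
    by_cases hemp : (((PySem.Dict.mk E).get? n).getD []).isEmpty
    · refine ⟨1, Nat.one_le_pow _ _ (by omega), ?_⟩
      intro f' rest res
      rw [show 1 + f' = f' + 1 from Nat.add_comm 1 f']
      rw [pvLoopB_succ, if_pos hemp, pvRecAE_succ, if_neg hnvis, if_pos hemp]
      congr 1
      simp [List.reverse_append]
    · have hcond_mem : ∀ p, ¬(p ∉ PySem.Set.add vis0 start ∧ p ∉ pre ++ [n]) →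
          p ∈ vis0 ++ (pre ++ [n]) := by
        intro p hp
        push_neg at hp
        rw [List.mem_append]
        by_cases hpv : p ∈ PySem.Set.add vis0 start
        · rcases (PySem.Set.mem_add _ _ _).mp hpv with h | h
          · exact Or.inl h
          · subst h; exact Or.inr h1
        · exact Or.inr (hp hpv)
      have seq : ∀ ps : List String, (∀ p ∈ ps, p ∈ E.flatMap (fun kv => kv.2)) →
          ∃ k, k ≤ ps.length * ((E.map (fun kv => kv.2.length)).sum + 2) ^ (f + 1) ∧
            ∀ (f' : Nat) (rest : List (String × List String)) (res : List (List String)),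
              pvLoopB E (PySem.Set.add vis0 start) (k + f')
                ((ps.filterMap (fun p => if p ∉ PySem.Set.add vis0 start ∧ p ∉ pre ++ [n]
                    then some (p, (pre ++ [n]) ++ [p]) else none)) ++ rest) res
              = pvLoopB E (PySem.Set.add vis0 start) f' rest
                  (res ++ ps.flatMap (fun p =>
                    (pvRecAE E (f + 1) p (vis0 ++ (pre ++ [n]))).map
                      (fun q => q ++ (pre ++ [n]).reverse))) := by
        intro ps
        induction ps with
        | nil => exact fun _ => ⟨0, by simp, fun f' rest res => by simp⟩
        | cons p ps ihs =>
          intro hps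
          obtain ⟨ks, hks, hseq⟩ := ihs (fun q hq => hps q (by simp [hq]))
          by_cases hc : p ∉ PySem.Set.add vis0 start ∧ p ∉ pre ++ [n]
          · have hpv0 : p ∉ vis0 := fun hm => hc.1 ((PySem.Set.mem_add _ _ _).mpr (Or.inl hm))
            have hnd : ((pre ++ [n]) ++ [p]).Nodup := by
              rw [List.nodup_append]
              refine ⟨h2, by simp, ?_⟩
              intro a ha b hb
              simp only [List.mem_singleton] at hb
              subst hb
              exact fun heq => hc.2 (heq ▸ ha)
            have hsub' : ((pre ++ [n]) ++ [p]).tail ⊆ E.flatMap (fun kv => kv.2) := by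
              intro q hq
              rw [List.tail_append_singleton_of_ne_nil (by simp)] at hq
              rcases List.mem_append.mp hq with hql | hqr
              · exact h4 hql
              · simp only [List.mem_singleton] at hqr
                rw [hqr]; exact hps p (by simp)
            obtain ⟨kp, hkp, hp⟩ := ih p (pre ++ [n]) (List.mem_append_left _ h1) hnd hpv0 hsub'
              (by simp only [List.length_append, List.length_singleton]; omega)
            refine ⟨kp + ks, ?_, ?_⟩
            · rw [List.length_cons, Nat.succ_mul]
              omega
            · intro f' rest res
              simp only [List.filterMap_cons, if_pos hc, List.cons_append]
              rw [show kp + ks + f' = kp + (ks + f') from by omega]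
              rw [hp (ks + f')]
              rw [hseq f' rest]
              congr 1
              simp [List.flatMap_cons, List.append_assoc]
          · have hmem := hcond_mem p hc
            refine ⟨ks, ?_, ?_⟩
            · rw [List.length_cons]
              exact le_trans hks (Nat.mul_le_mul_right _ (Nat.le_succ _))
            · intro f' rest res
              have hnilp : pvRecAE E (f + 1) p (vis0 ++ (pre ++ [n])) = [] :=
                pvRecAE_nil_of_mem _ _ _ _ hmem
              simp only [List.filterMap_cons, if_neg hc, List.flatMap_cons, hnilp,
                List.map_nil, List.nil_append]
              exact hseq f' rest res
      obtain ⟨ks, hks, hseq⟩ := seq (((PySem.Dict.mk E).get? n).getD []) (pvGet_sub E n)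
      have hlen := pvGet_len E n
      have hx : 1 ≤ ((E.map (fun kv => kv.2.length)).sum + 2) ^ (f + 1) :=
        Nat.one_le_pow _ _ (by omega)
      refine ⟨1 + ks, ?_, ?_⟩
      · have h1' := Nat.mul_le_mul_right
          (((E.map (fun kv => kv.2.length)).sum + 2) ^ (f + 1)) hlen
        rw [pow_succ]
        nlinarith
      · intro f' rest res
        rw [show 1 + ks + f' = (ks + f') + 1 from by omega]
        rw [pvLoopB_succ, if_neg hemp, pvPush_eq]
        rw [hseq f' rest res]
        have hadd : PySem.Set.add (vis0 ++ pre) n = vis0 ++ (pre ++ [n]) := by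
          rw [pvAdd_eq _ _ hnvis, List.append_assoc]
        have hA : (pvRecAE E (f + 1 + 1) n (vis0 ++ pre)).map (fun q => q ++ pre.reverse)
            = (((PySem.Dict.mk E).get? n).getD []).flatMap (fun p =>
                (pvRecAE E (f + 1) p (vis0 ++ (pre ++ [n]))).map
                  (fun q => q ++ (pre ++ [n]).reverse)) := by
          rw [pvRecAE_succ, if_neg hnvis, if_neg hemp, hadd]
          rw [PySem.List.foldl_append_eq_flatMap]
          simp only [List.nil_append, List.map_flatMap, List.map_map]
          congr 1
          funext p
          simp [Function.comp, List.reverse_append]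
        rw [hA]

-- ===== VERDICT (by name: the statement is the Claim_ definition above) =====
theorem trace_backward_py_spec : Claim_equal_trace_backward_py := by
  intro start_id graph artifacts visited _hdom hpre
  unfold Spec_trace_backward_py
  unfold trace_backward_py trace_backward_py_alt
  by_cases hmem : start_id ∈ visited.getD []
  · obtain ⟨m, hm⟩ : ∃ m, pvFuelA graph = m + 1 := ⟨pvFuelA graph - 1, by unfold pvFuelA; omega⟩
    rw [hm, pvRecA_succ, if_pos hmem]
    simp [hmem]
  · rcases hpre with h | h
    · exact absurd h hmem
    obtain ⟨E, hE⟩ := pvKey_some graph h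
    rw [pvRecA_eq graph E hE]
    simp only [pvFuelA, pvFuelB, hE, if_neg hmem]
    obtain ⟨k, hk, heq⟩ :=
      pvMain E (visited.getD []) start_id hmem ((E.map (fun kv => kv.2.length)).sum + 1)
        start_id [] (by simp) (by simp) hmem (by simp) (by omega)
    have hk2 : k ≤ ((E.map (fun kv => kv.2.length)).sum + 2) ^
        ((E.map (fun kv => kv.2.length)).sum + 2) := hk
    have hstep := heq (((E.map (fun kv => kv.2.length)).sum + 2) ^
        ((E.map (fun kv => kv.2.length)).sum + 2) - k) [] []
    rw [show k + (((E.map (fun kv => kv.2.length)).sum + 2) ^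
        ((E.map (fun kv => kv.2.length)).sum + 2) - k)
        = ((E.map (fun kv => kv.2.length)).sum + 2) ^
          ((E.map (fun kv => kv.2.length)).sum + 2) from by omega] at hstep
    have e2 : (E.map (fun kv => kv.2.length)).sum + 1 + 1
        = (E.map (fun kv => kv.2.length)).sum + 2 := rfl
    simp only [List.nil_append, e2] at hstep
    rw [hstep, pvLoopB_nil]
    simp
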